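-- pv_equiv track=rewrite | github.com/Varun-Choudhry/ContractQA | core/document/chunker.py | classify_refs
-- ===== SOURCE A (Python) =====
-- from typing import List, Dict, Any, Set
--
-- def classify_refs(refs: List[str]) -> str:
--     """Classifies a list of references based on whether they point to sections."""
--     normalized = [ref.lstrip("/") for ref in refs]
--     has_sections = any(ref.startswith("sections/") for ref in normalized)
--     has_tables = any(ref.startswith("table") for ref in normalized)
--     has_non_sections_or_tables = any(not ref.startswith("sections/") and not ref.startswith("table") for ref in normalized)
--
--     if has_sections and not has_non_sections_or_tables and not has_tables:
--         return "only_sections"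
--     elif has_tables and not has_non_sections_or_tables and not has_sections:
--         return "only_tables"
--     elif (has_sections and has_non_sections_or_tables) or \
--             (has_tables and has_non_sections_or_tables) or \
--             (has_sections and has_tables):
--         return "mixed"
--     elif not has_sections and not has_tables and has_non_sections_or_tables:
--         return "only_non_sections"
--     else:
--         return "empty_or_unknown"
-- ===== SOURCE B (Python) =====
-- def classify_refs(refs):
--     """Classifies a list of references based on whether they point to sections."""
--     kinds = set()
--     for ref in refs:
--         r = ref.lstrip("/")
--         if r.startswith("sections/"):
--             kinds.add("section")
--         elif r.startswith("table"):
--             kinds.add("table")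
--         else:
--             kinds.add("other")
--     if len(kinds) > 1:
--         return "mixed"
--     if "section" in kinds:
--         return "only_sections"
--     if "table" in kinds:
--         return "only_tables"
--     if "other" in kinds:
--         return "only_non_sections"
--     return "empty_or_unknown"
-- ===== Notes on version B (the rewrite author's own statement) =====
-- stated objective: simpler
-- what changed: A's three separate any() scans over the normalized list (plus a five-way boolean decision table) are replaced by one pass that tags each ref into a set of kinds and a short branch on that set.
import Mathlib
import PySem

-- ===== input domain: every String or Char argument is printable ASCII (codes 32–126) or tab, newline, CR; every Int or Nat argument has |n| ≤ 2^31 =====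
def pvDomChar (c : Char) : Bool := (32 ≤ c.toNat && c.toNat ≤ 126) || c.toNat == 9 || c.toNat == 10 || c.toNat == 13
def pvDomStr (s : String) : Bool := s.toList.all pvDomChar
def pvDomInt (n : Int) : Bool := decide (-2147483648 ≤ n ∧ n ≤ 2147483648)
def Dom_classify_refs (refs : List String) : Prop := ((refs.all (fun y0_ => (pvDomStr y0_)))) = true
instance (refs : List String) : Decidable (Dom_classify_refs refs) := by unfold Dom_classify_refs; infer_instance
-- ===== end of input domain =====

-- B replaces A's three any() scans (and five-way boolean decision) by one tagging pass into a set; objective: simpler.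

-- ===== PORT A =====
-- ref.lstrip("/"): hand port, exact — drops exactly the leading '/' characters
def pvLstripSlash (s : String) : String := String.ofList (s.toList.dropWhile (fun c => c == '/'))

def classify_refs (refs : List String) : String :=
  let normalized := refs.map pvLstripSlash
  let has_sections := normalized.any (fun r => PySem.Str.startswith r "sections/")
  let has_tables := normalized.any (fun r => PySem.Str.startswith r "table")
  let has_non := normalized.any (fun r =>
    !PySem.Str.startswith r "sections/" && !PySem.Str.startswith r "table")
  if has_sections && !has_non && !has_tables then "only_sections"
  else if has_tables && !has_non && !has_sections then "only_tables"
  else if (has_sections && has_non) || (has_tables && has_non) || (has_sections && has_tables) then "mixed"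
  else if !has_sections && !has_tables && has_non then "only_non_sections"
  else "empty_or_unknown"

-- ===== PORT B =====
-- the tag Source B's loop body adds for one ref (r = ref.lstrip("/") computed inline)
def pvTag (ref : String) : String :=
  if PySem.Str.startswith (pvLstripSlash ref) "sections/" then "section"
  else if PySem.Str.startswith (pvLstripSlash ref) "table" then "table"
  else "other"

def classify_refs_alt (refs : List String) : String :=
  let kinds : PySem.Set String :=
    refs.foldl (fun s ref => PySem.Set.add s (pvTag ref)) PySem.Set.empty
  if 1 < kinds.length then "mixed"
  else if PySem.Set.contains kinds "section" then "only_sections"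
  else if PySem.Set.contains kinds "table" then "only_tables"
  else if PySem.Set.contains kinds "other" then "only_non_sections"
  else "empty_or_unknown"

-- ===== PRECONDITION & SPEC =====
def Spec_classify_refs (refs : List String) (out : String) : Prop := out = classify_refs_alt refs
instance (refs : List String) (out : String) : Decidable (Spec_classify_refs refs out) := by unfold Spec_classify_refs; infer_instance

-- ===== CLAIM (what is proved, stated in full; the proofs are below) =====
def Claim_equal_classify_refs : Prop := ∀ (refs : List String), Dom_classify_refs refs → Spec_classify_refs refs (classify_refs refs)

-- ===== LEMMAS AND PROOFS =====

-- a string cannot start with both "sections/" and "table"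
theorem pv_sw_disjoint (r : String) :
    ¬ (PySem.Str.startswith r "sections/" = true ∧ PySem.Str.startswith r "table" = true) := by
  rintro ⟨h1, h2⟩
  simp only [PySem.Str.startswith_eq] at h1 h2
  rw [PySem.Chars.startswith_iff] at h1 h2
  have e1 : ("sections/" : String).toList = 's' :: "ections/".toList := by decide
  have e2 : ("table" : String).toList = 't' :: "able".toList := by decide
  cases h : r.toList with
  | nil =>
    rw [h, e1] at h1
    exact absurd h1 (by simp)
  | cons c cs =>
    rw [h, e1, List.cons_prefix_cons] at h1
    rw [h, e2, List.cons_prefix_cons] at h2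
    exact absurd (h1.1.trans h2.1.symm) (by decide)

theorem pvTag_section (r : String) :
    pvTag r = "section" ↔ PySem.Str.startswith (pvLstripSlash r) "sections/" = true := by
  unfold pvTag; split_ifs with h1 h2 <;> simp_all

theorem pvTag_table (r : String) :
    pvTag r = "table" ↔ PySem.Str.startswith (pvLstripSlash r) "table" = true := by
  unfold pvTag; split_ifs with h1 h2
  · constructor
    · intro h; exact absurd h (by decide)
    · intro h; exact (pv_sw_disjoint _ ⟨h1, h⟩).elim
  · simp_all
  · simp_all

theorem pvTag_other (r : String) :
    pvTag r = "other" ↔ (PySem.Str.startswith (pvLstripSlash r) "sections/" = false ∧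
      PySem.Str.startswith (pvLstripSlash r) "table" = false) := by
  unfold pvTag; split_ifs with h1 h2 <;> simp_all

theorem pvTag_cases (r : String) : pvTag r = "section" ∨ pvTag r = "table" ∨ pvTag r = "other" := by
  unfold pvTag; split_ifs <;> simp

-- the kinds set built by B's loop is set(tags)
theorem pv_kinds_eq (refs : List String) :
    refs.foldl (fun s ref => PySem.Set.add s (pvTag ref)) PySem.Set.empty
      = PySem.Set.ofList (refs.map pvTag) := by
  rw [← PySem.Set.update_map_eq_foldl_add]
  exact PySem.Set.update_nil_left _

-- a Nodup list whose members lie in {"section","table","other"} has ≥ 2 elements iff two of the three are members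
theorem pv_len_gt_one (S : List String) (hnd : S.Nodup)
    (hsub : ∀ x ∈ S, x = "section" ∨ x = "table" ∨ x = "other") :
    1 < S.length ↔ (("section" ∈ S ∧ "table" ∈ S) ∨ ("section" ∈ S ∧ "other" ∈ S) ∨
      ("table" ∈ S ∧ "other" ∈ S)) := by
  constructor
  · intro hlen
    match S, hlen with
    | x :: y :: t, _ =>
      have hx := hsub x (by simp)
      have hy := hsub y (by simp)
      have hxy : x ≠ y := by
        simp only [List.nodup_cons, List.mem_cons] at hnd
        exact fun h => hnd.1 (Or.inl h)
      have hxm : x ∈ x :: y :: t := by simp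
      have hym : y ∈ x :: y :: t := by simp
      rcases hx with hx | hx | hx <;> rcases hy with hy | hy | hy <;>
        subst hx <;> subst hy <;> simp_all
  · rintro (⟨h1, h2⟩ | ⟨h1, h2⟩ | ⟨h1, h2⟩) <;>
    · match S with
      | [] => simp at h1
      | [x] =>
        simp only [List.mem_singleton] at h1 h2
        exact absurd (h1.trans h2.symm) (by decide)
      | x :: y :: t => simp

-- ===== VERDICT (by name: the statement is the Claim_ definition above) =====
theorem classify_refs_spec : Claim_equal_classify_refs := by
  intro refs _
  unfold Spec_classify_refs
  simp only [classify_refs, classify_refs_alt]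
  rw [pv_kinds_eq]
  set tags := refs.map pvTag with htags
  have hnd : (PySem.Set.ofList tags).Nodup := PySem.Set.nodup_ofList _
  have hsub : ∀ x ∈ PySem.Set.ofList tags, x = "section" ∨ x = "table" ∨ x = "other" := by
    intro x hx
    rw [PySem.Set.mem_ofList] at hx
    obtain ⟨r, _, hr⟩ := List.mem_map.mp hx
    subst hr; exact pvTag_cases r
  -- A's three booleans, rewritten as membership tests on tags
  have hsec : (refs.map pvLstripSlash).any (fun r => PySem.Str.startswith r "sections/")
      = decide ("section" ∈ tags) := by
    rw [Bool.eq_iff_iff, List.any_map, List.any_eq_true, decide_eq_true_iff, htags]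
    simp only [Function.comp, List.mem_map]
    constructor
    · rintro ⟨r, hr, h⟩; exact ⟨r, hr, (pvTag_section r).mpr h⟩
    · rintro ⟨r, hr, h⟩; exact ⟨r, hr, (pvTag_section r).mp h⟩
  have htab : (refs.map pvLstripSlash).any (fun r => PySem.Str.startswith r "table")
      = decide ("table" ∈ tags) := by
    rw [Bool.eq_iff_iff, List.any_map, List.any_eq_true, decide_eq_true_iff, htags]
    simp only [Function.comp, List.mem_map]
    constructor
    · rintro ⟨r, hr, h⟩; exact ⟨r, hr, (pvTag_table r).mpr h⟩
    · rintro ⟨r, hr, h⟩; exact ⟨r, hr, (pvTag_table r).mp h⟩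
  have hoth : (refs.map pvLstripSlash).any (fun r =>
        !PySem.Str.startswith r "sections/" && !PySem.Str.startswith r "table")
      = decide ("other" ∈ tags) := by
    rw [Bool.eq_iff_iff, List.any_map, List.any_eq_true, decide_eq_true_iff, htags]
    simp only [Function.comp, List.mem_map, Bool.and_eq_true, Bool.not_eq_true']
    constructor
    · rintro ⟨r, hr, h1, h2⟩; exact ⟨r, hr, (pvTag_other r).mpr ⟨h1, h2⟩⟩
    · rintro ⟨r, hr, h⟩
      have hh := (pvTag_other r).mp h
      exact ⟨r, hr, hh.1, hh.2⟩
  -- B's membership tests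
  have hcs : PySem.Set.contains (PySem.Set.ofList tags) "section" = decide ("section" ∈ tags) := by
    rw [Bool.eq_iff_iff, PySem.Set.contains_iff, PySem.Set.mem_ofList, decide_eq_true_iff]
  have hct : PySem.Set.contains (PySem.Set.ofList tags) "table" = decide ("table" ∈ tags) := by
    rw [Bool.eq_iff_iff, PySem.Set.contains_iff, PySem.Set.mem_ofList, decide_eq_true_iff]
  have hco : PySem.Set.contains (PySem.Set.ofList tags) "other" = decide ("other" ∈ tags) := by
    rw [Bool.eq_iff_iff, PySem.Set.contains_iff, PySem.Set.mem_ofList, decide_eq_true_iff]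
  have hlen := pv_len_gt_one (PySem.Set.ofList tags) hnd hsub
  simp only [PySem.Set.mem_ofList] at hlen
  simp only [hsec, htab, hoth, hcs, hct, hco, hlen]
  by_cases bs : "section" ∈ tags <;> by_cases bt : "table" ∈ tags <;> by_cases bo : "other" ∈ tags <;>
    simp [bs, bt, bo]
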